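-- pv_equiv track=rewrite | github.com/cslab-ntua/sparsex | python/delta_helpers.py | delta_l_size
-- ===== SOURCE A (Python) =====
-- def delta_l_size(l):
-- 	al = abs(l)
-- 	shift = 6
-- 	i = 1
-- 	while True:
-- 		max = (1<<shift) - 1
-- 		if al <= max:
-- 			return i
-- 		i += 1
-- 		shift += 7
-- ===== SOURCE B (Python) =====
-- def delta_l_size(l):
-- 	# closed form: first byte holds 6 bits, each further byte 7 more
-- 	b = abs(l).bit_length()
-- 	return 1 + max(0, -(-(b - 6) // 7))
-- ===== Notes on version B (the rewrite author's own statement) =====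
-- stated objective: simpler
-- what changed: Replaces the while-loop that grows the shift 7 bits at a time with a closed-form ceiling computation on abs(l).bit_length().
import Mathlib
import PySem

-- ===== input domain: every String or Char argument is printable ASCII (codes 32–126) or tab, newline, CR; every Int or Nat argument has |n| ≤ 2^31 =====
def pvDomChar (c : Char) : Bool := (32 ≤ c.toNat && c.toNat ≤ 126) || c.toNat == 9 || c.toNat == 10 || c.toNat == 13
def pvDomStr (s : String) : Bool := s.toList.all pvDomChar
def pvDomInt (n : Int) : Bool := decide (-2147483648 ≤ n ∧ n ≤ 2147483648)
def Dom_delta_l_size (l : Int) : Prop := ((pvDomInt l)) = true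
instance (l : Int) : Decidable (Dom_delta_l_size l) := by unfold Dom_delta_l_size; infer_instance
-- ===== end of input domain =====

-- B replaces A's shift-growing while-loop with a closed-form ceiling on the bit length (simpler).

-- ===== PORT A =====
-- the while-loop; shift is ported as Nat (in A it is always 6 + 7k ≥ 0, and 1 << shift = 2^shift)
def delta_l_size_loop (al : Int) (shift : Nat) (i : Int) : Int :=
  let max := ((1 <<< shift : Int)) - 1
  if al ≤ max then i
  else delta_l_size_loop al (shift + 7) (i + 1)
termination_by al.toNat + 1 - 2 ^ shift
decreasing_by
  simp only [not_le] at *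
  have h1 : (1 <<< shift : Int) = 2 ^ shift := by
    simp [Int.shiftLeft_eq]
  have h2 : (2 : Int) ^ shift ≤ al := by omega
  have h3 : 2 ^ shift ≤ al.toNat := by
    have : ((2 ^ shift : Nat) : Int) ≤ al := by push_cast; omega
    omega
  have h4 : (2:Nat) ^ shift < 2 ^ (shift + 7) :=
    Nat.pow_lt_pow_right (by norm_num) (by omega)
  omega

def delta_l_size (l : Int) : Int :=
  delta_l_size_loop |l| 6 1

-- ===== PORT B =====
def delta_l_size_alt (l : Int) : Int :=
  let b : Int := (PySem.Int.bitLength l : Int)   -- abs(l).bit_length(); bitLength reads |l|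
  1 + max 0 (-(PySem.Int.floordiv (-(b - 6)) 7))

-- ===== PRECONDITION & SPEC =====
def Spec_delta_l_size (l : Int) (out : Int) : Prop := out = delta_l_size_alt l
instance (l : Int) (out : Int) : Decidable (Spec_delta_l_size l out) := by unfold Spec_delta_l_size; infer_instance

-- ===== CLAIM (what is proved, stated in full; the proofs are below) =====
def Claim_equal_delta_l_size : Prop := ∀ (l : Int), Dom_delta_l_size l → Spec_delta_l_size l (delta_l_size l)

-- ===== LEMMAS AND PROOFS =====

-- B's value is 1 + q once the ceiling is pinned by bracketing the bit length
theorem alt_val (l : Int) (q : Int) (hq : 0 ≤ q)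
    (h1 : (q - 1) * 7 < (PySem.Int.bitLength l : Int) - 6)
    (h2 : (PySem.Int.bitLength l : Int) - 6 ≤ q * 7) :
    delta_l_size_alt l = 1 + q := by
  unfold delta_l_size_alt
  have h := (PySem.Int.neg_floordiv_neg_eq_iff_of_pos
      (a := (PySem.Int.bitLength l : Int) - 6) (b := 7) (q := q) (by norm_num)).mpr ⟨h1, h2⟩
  show 1 + max 0 (-(PySem.Int.floordiv (-((PySem.Int.bitLength l : Int) - 6)) 7)) = 1 + q
  rw [h]
  omega

-- bracketing the bit length: n < 2^k gives bitLength ≤ k, and 2^k ≤ n gives k < bitLength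
theorem bitLength_le_of_lt (l : Int) (k : Nat) (h : l.natAbs < 2 ^ k) :
    PySem.Int.bitLength l ≤ k := by
  by_contra hcon
  have hne : l ≠ 0 := by
    intro h0
    rw [h0] at hcon
    have h00 : PySem.Int.bitLength 0 = 0 := by decide
    omega
  have hlow := PySem.Int.two_pow_bitLength_le l hne
  have : (2:Nat) ^ k ≤ 2 ^ (PySem.Int.bitLength l - 1) :=
    Nat.pow_le_pow_right (by norm_num) (by omega)
  omega

theorem lt_bitLength_of_le (l : Int) (k : Nat) (h : 2 ^ k ≤ l.natAbs) :
    k < PySem.Int.bitLength l := by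
  by_contra hcon
  have hub := PySem.Int.lt_two_pow_bitLength l
  have : (2:Nat) ^ (PySem.Int.bitLength l) ≤ 2 ^ k :=
    Nat.pow_le_pow_right (by norm_num) (by omega)
  omega

-- evaluating A's loop on the domain: at most five iterations
theorem loop_step (al : Int) (shift : Nat) (i : Int) :
    delta_l_size_loop al shift i =
      if al ≤ ((1 <<< shift : Int)) - 1 then i
      else delta_l_size_loop al (shift + 7) (i + 1) := by
  rw [delta_l_size_loop]

theorem A_eval (l : Int) (h : l.natAbs ≤ 2 ^ 31) :
    delta_l_size l =
      if l.natAbs ≤ 63 then 1 else if l.natAbs ≤ 8191 then 2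
      else if l.natAbs ≤ 1048575 then 3 else if l.natAbs ≤ 134217727 then 4 else 5 := by
  have habs : |l| = (l.natAbs : Int) := Int.abs_eq_natAbs l
  have e6 : ((1 <<< 6 : Int)) = 64 := by decide
  have e13 : ((1 <<< 13 : Int)) = 8192 := by decide
  have e20 : ((1 <<< 20 : Int)) = 1048576 := by decide
  have e27 : ((1 <<< 27 : Int)) = 134217728 := by decide
  have e34 : ((1 <<< 34 : Int)) = 17179869184 := by decide
  unfold delta_l_size
  rw [habs, loop_step, e6, loop_step, e13, loop_step, e20, loop_step, e27,
      loop_step, e34]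
  split_ifs <;> omega

-- ===== VERDICT (by name: the statement is the Claim_ definition above) =====
theorem delta_l_size_spec : Claim_equal_delta_l_size := by
  intro l hdom
  unfold Spec_delta_l_size
  have hdom' : l.natAbs ≤ 2 ^ 31 := by
    have : (-2147483648 ≤ l ∧ l ≤ 2147483648) := by
      simpa [Dom_delta_l_size, pvDomInt] using hdom
    omega
  have hub := PySem.Int.lt_two_pow_bitLength l
  rw [A_eval l hdom']
  split_ifs with g1 g2 g3 g4
  · have hb : PySem.Int.bitLength l ≤ 6 := bitLength_le_of_lt l 6 (by omega)
    rw [alt_val l 0 (by norm_num) (by push_cast; omega) (by push_cast; omega)]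
    norm_num
  · have hb1 : PySem.Int.bitLength l ≤ 13 := bitLength_le_of_lt l 13 (by omega)
    have hb2 : 6 < PySem.Int.bitLength l := lt_bitLength_of_le l 6 (by omega)
    rw [alt_val l 1 (by norm_num) (by push_cast; omega) (by push_cast; omega)]
    norm_num
  · have hb1 : PySem.Int.bitLength l ≤ 20 := bitLength_le_of_lt l 20 (by omega)
    have hb2 : 13 < PySem.Int.bitLength l := lt_bitLength_of_le l 13 (by omega)
    rw [alt_val l 2 (by norm_num) (by push_cast; omega) (by push_cast; omega)]
    norm_num
  · have hb1 : PySem.Int.bitLength l ≤ 27 := bitLength_le_of_lt l 27 (by omega)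
    have hb2 : 20 < PySem.Int.bitLength l := lt_bitLength_of_le l 20 (by omega)
    rw [alt_val l 3 (by norm_num) (by push_cast; omega) (by push_cast; omega)]
    norm_num
  · have hb1 : PySem.Int.bitLength l ≤ 32 := bitLength_le_of_lt l 32 (by omega)
    have hb2 : 27 < PySem.Int.bitLength l := lt_bitLength_of_le l 27 (by omega)
    rw [alt_val l 4 (by norm_num) (by push_cast; omega) (by push_cast; omega)]
    norm_num
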